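-- pv_equiv track=rewrite | github.com/itzelic-code/Algorithm-Problem | 프로그래머스/2/131127. 할인 행사/할인 행사.py | solution
-- ===== SOURCE A (Python) =====
-- def solution(want, number, discount):
--     # 상품 - 수량 dict
--     want_dict = {want[i]: number[i] for i in range(len(want))}
--     count = 0
--     discount_length = len(discount)
--
--     # 슬라이딩 윈도우
--     for i in range(discount_length - 9):  # 10일 동안 할인 행사
--         current_discount = discount[i:i + 10]  # 10일 동안 할인 상품
--         current_count = {}
--
--         # 할인 상품 수량 계산
--         for item in current_discount:
--             if item in want_dict:
--                 current_count[item] = current_count.get(item, 0) + 1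
--
--         # 수량 확인
--         if all(current_count.get(item, 0) >= want_dict[item] for item in want_dict):
--             count += 1
--
--     return count
-- ===== SOURCE B (Python) =====
-- def solution(want, number, discount):
--     req = {}
--     for k, v in zip(want, number):
--         req[k] = v
--     # one prefix-count list per wanted product: prefix[k][j] = occurrences of k in discount[:j]
--     prefix = {}
--     for k in req:
--         p = [0]
--         c = 0
--         for item in discount:
--             c += 1 if item == k else 0
--             p.append(c)
--         prefix[k] = p
--     total = 0
--     for i in range(len(discount) - 9):
--         if all(p[i + 10] - p[i] >= req[k] for k, p in prefix.items()):
--             total += 1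
--     return total
-- ===== Notes on version B (the rewrite author's own statement) =====
-- stated objective: alternative
-- what changed: B replaces A's per-window recount (slice each 10-day window and rebuild a count dict) with one prefix-count list per wanted product built in advance, so each window is checked by prefix-difference lookups only; Pre_ excludes inputs where len(number) < len(want), on which A raises IndexError.
import Mathlib
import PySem

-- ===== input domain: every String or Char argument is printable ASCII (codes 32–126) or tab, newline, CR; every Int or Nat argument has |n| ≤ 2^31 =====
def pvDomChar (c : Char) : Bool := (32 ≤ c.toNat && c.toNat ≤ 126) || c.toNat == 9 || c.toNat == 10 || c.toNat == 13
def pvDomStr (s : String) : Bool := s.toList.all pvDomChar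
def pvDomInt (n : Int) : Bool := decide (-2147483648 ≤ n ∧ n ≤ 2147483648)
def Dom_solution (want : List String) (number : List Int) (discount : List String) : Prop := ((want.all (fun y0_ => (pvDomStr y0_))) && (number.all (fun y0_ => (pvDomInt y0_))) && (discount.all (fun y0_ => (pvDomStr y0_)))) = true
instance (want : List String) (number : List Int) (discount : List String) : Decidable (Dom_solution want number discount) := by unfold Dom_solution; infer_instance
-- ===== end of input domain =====

-- B builds one prefix-count list per wanted product in a single pass over discount and checks each
-- 10-day window by prefix differences, instead of A's slicing and recounting of every window.

-- ===== PORT A =====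
def solution (want : List String) (number : List Int) (discount : List String) : Int :=
  let wantDict : PySem.Dict String Int :=
    (PySem.List.pyRange 0 (want.length : Int) 1).foldl
      (fun d i => d.insert (PySem.List.pyGetD want i "") (PySem.List.pyGetD number i 0))
      PySem.Dict.empty
  (PySem.List.pyRange 0 ((discount.length : Int) - 9) 1).foldl
    (fun count i =>
      let currentDiscount := PySem.List.slice discount (some i) (some (i + 10))
      let currentCount : PySem.Dict String Int :=
        currentDiscount.foldl
          (fun d item =>
            if wantDict.contains item then d.insert item (d.getD item 0 + 1) else d)
          PySem.Dict.empty
      if wantDict.keys.all (fun item =>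
          decide (currentCount.getD item 0 ≥ wantDict.getD item 0)) then count + 1 else count)
    0

-- ===== PORT B =====
def solution_alt (want : List String) (number : List Int) (discount : List String) : Int :=
  let req : PySem.Dict String Int :=
    (want.zip number).foldl (fun d p => d.insert p.1 p.2) PySem.Dict.empty
  let pref : PySem.Dict String (List Int) :=
    req.keys.foldl
      (fun d k =>
        let pc :=
          discount.foldl
            (fun (pc : List Int × Int) item =>
              let c := pc.2 + (if item == k then 1 else 0)
              (pc.1 ++ [c], c))
            ([0], 0)
        d.insert k pc.1)
      PySem.Dict.empty
  (PySem.List.pyRange 0 ((discount.length : Int) - 9) 1).foldl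
    (fun total i =>
      if pref.items.all (fun kp =>
          decide (PySem.List.pyGetD kp.2 (i + 10) 0 - PySem.List.pyGetD kp.2 i 0 ≥ req.getD kp.1 0))
        then total + 1 else total)
    0

-- ===== PRECONDITION & SPEC =====
-- Pre_ excludes exactly the inputs where A raises IndexError (number shorter than want).
def Pre_solution (want : List String) (number : List Int) (discount : List String) : Prop :=
  want.length ≤ number.length
instance (want : List String) (number : List Int) (discount : List String) : Decidable (Pre_solution want number discount) := by unfold Pre_solution; infer_instance
def pvWitness_solution : List String × List Int × List String :=
  (["a", "b"], [1, 2], ["a", "b", "a", "a", "b", "b", "a", "b", "a", "b", "c"])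

def Spec_solution (want : List String) (number : List Int) (discount : List String) (out : Int) : Prop := out = solution_alt want number discount
instance (want : List String) (number : List Int) (discount : List String) (out : Int) : Decidable (Spec_solution want number discount out) := by unfold Spec_solution; infer_instance

-- ===== CLAIM (what is proved, stated in full; the proofs are below) =====
def Claim_equal_solution : Prop := ∀ (want : List String) (number : List Int) (discount : List String), Dom_solution want number discount → Pre_solution want number discount → Spec_solution want number discount (solution want number discount)

-- ===== LEMMAS AND PROOFS =====

def pvWin (discount : List String) (j : Nat) : List String := (discount.drop j).take 10
def pvOK (wd : PySem.Dict String Int) (discount : List String) (j : Nat) : Bool :=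
  wd.keys.all (fun k => decide (wd.getD k 0 ≤ ((pvWin discount j).count k : Int)))
def pvSpec (wd : PySem.Dict String Int) (discount : List String) : Int :=
  (List.range ((discount.length : Int) - 9).toNat).foldl
    (fun c j => if pvOK wd discount j then c + 1 else c) 0

lemma pv_all_congr {l : List String} {p q : String → Bool} (h : ∀ x ∈ l, p x = q x) :
    l.all p = l.all q := by
  induction l with
  | nil => rfl
  | cons x t ih => simp only [List.all_cons, h x (by simp), ih (fun y hy => h y (by simp [hy]))]

lemma pv_zip_map (want : List String) (number : List Int)
    (h : want.length ≤ number.length) :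
    (List.range want.length).map (fun k => (want.getD k "", number.getD k 0)) = want.zip number := by
  apply List.ext_getElem
  · simp [List.length_zip, Nat.min_eq_left h]
  · intro i h1 h2
    have hw : i < want.length := by simpa using h1
    have hn : i < number.length := lt_of_lt_of_le hw h
    simp [List.getElem_zip, hw, hn]

-- the two dict-building loops produce the same dict
lemma pv_dict_eq (want : List String) (number : List Int)
    (h : want.length ≤ number.length) :
    (PySem.List.pyRange 0 (want.length : Int) 1).foldl
      (fun d i => d.insert (PySem.List.pyGetD want i "") (PySem.List.pyGetD number i 0))
      PySem.Dict.empty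
    = (want.zip number).foldl (fun d p => d.insert p.1 p.2) PySem.Dict.empty := by
  rw [PySem.List.pyRange_one, ← pv_zip_map want number h]
  simp [List.foldl_map]

lemma pv_A_eq (wd : PySem.Dict String Int) (discount : List String) :
    (PySem.List.pyRange 0 ((discount.length : Int) - 9) 1).foldl
      (fun count i =>
        let currentDiscount := PySem.List.slice discount (some i) (some (i + 10))
        let currentCount : PySem.Dict String Int :=
          currentDiscount.foldl
            (fun d item => if wd.contains item then d.insert item (d.getD item 0 + 1) else d)
            PySem.Dict.empty
        if wd.keys.all (fun item =>
            decide (currentCount.getD item 0 ≥ wd.getD item 0)) then count + 1 else count) 0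
    = pvSpec wd discount := by
  rw [PySem.List.pyRange_one]
  rw [List.foldl_map]
  unfold pvSpec
  have h9 : ((discount.length : Int) - 9 - 0) = ((discount.length : Int) - 9) := by ring
  rw [h9]
  apply PySem.List.foldl_congr_mem
  intro acc j hj
  simp only [zero_add]
  have hslice : PySem.List.slice discount (some (j : Int)) (some ((j : Int) + 10))
      = pvWin discount j := by
    have h10 : ((j : Int) + 10) = ((j + 10 : Nat) : Int) := by push_cast; ring
    rw [h10, PySem.List.slice_natCast]
    simp [pvWin]
  rw [hslice]
  have hall : (wd.keys.all fun item =>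
      decide ((List.foldl (fun d item => if wd.contains item = true then d.insert item (d.getD item 0 + 1) else d)
        PySem.Dict.empty (pvWin discount j)).getD item 0 ≥ wd.getD item 0)) = pvOK wd discount j := by
    unfold pvOK
    apply pv_all_congr
    intro k hk
    have hc : wd.contains k = true := (PySem.Dict.contains_iff_mem_keys wd k).2 hk
    rw [PySem.List.foldl_if_eq_foldl_filter, PySem.Dict.getD_foldl_insert_add_one,
      List.count_filter hc]
    simp [ge_iff_le]
  rw [hall]

lemma pv_pref_fold (xs : List String) (k : String) (p0 : List Int) (c0 : Int) :
    xs.foldl (fun (pc : List Int × Int) item =>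
        let c := pc.2 + (if item == k then 1 else 0)
        (pc.1 ++ [c], c)) (p0, c0)
    = (p0 ++ (List.range xs.length).map (fun j => c0 + ((xs.take (j+1)).count k : Int)),
       c0 + (xs.count k : Int)) := by
  induction xs generalizing p0 c0 with
  | nil => simp
  | cons x t ih =>
    simp only [List.foldl_cons]
    rw [ih]
    refine Prod.ext ?_ ?_
    · simp only [List.length_cons, List.range_succ_eq_map, List.map_cons, List.map_map,
        List.append_assoc, List.singleton_append]
      congr 1
      · simp [List.count_cons]
        intro a _
        ring
    · simp only [List.count_cons]
      push_cast
      ring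

lemma pv_P_getD (xs : List String) (k : String) (j : Nat) (hj : j ≤ xs.length) :
    PySem.List.pyGetD ((0:Int) :: (List.range xs.length).map (fun m => ((xs.take (m+1)).count k : Int))) (j : Int) 0
      = ((xs.take j).count k : Int) := by
  rw [PySem.List.pyGetD_natCast]
  cases j with
  | zero => simp
  | succ m =>
    have hm : m < xs.length := by omega
    simp [List.getD_eq_getElem?_getD, hm]

lemma pv_B_eq (req : PySem.Dict String Int) (discount : List String) (hnd : req.keys.Nodup) :
    (let pref : PySem.Dict String (List Int) :=
      req.keys.foldl
        (fun d k =>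
          let pc :=
            discount.foldl
              (fun (pc : List Int × Int) item =>
                let c := pc.2 + (if item == k then 1 else 0)
                (pc.1 ++ [c], c))
              ([0], 0)
          d.insert k pc.1)
        PySem.Dict.empty
    (PySem.List.pyRange 0 ((discount.length : Int) - 9) 1).foldl
      (fun total i =>
        if pref.items.all (fun kp =>
            decide (PySem.List.pyGetD kp.2 (i + 10) 0 - PySem.List.pyGetD kp.2 i 0 ≥ req.getD kp.1 0))
          then total + 1 else total)
      0)
    = pvSpec req discount := by
  have hitems : (req.keys.foldl
      (fun d k =>
        let pc :=
          discount.foldl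
            (fun (pc : List Int × Int) item =>
              let c := pc.2 + (if item == k then 1 else 0)
              (pc.1 ++ [c], c))
            ([0], 0)
        d.insert k pc.1)
      PySem.Dict.empty).items
      = req.keys.map (fun k =>
          (k, (0:Int) :: (List.range discount.length).map
                (fun m => ((discount.take (m+1)).count k : Int)))) := by
    have hzeta : (req.keys.foldl
        (fun d k =>
          let pc :=
            discount.foldl
              (fun (pc : List Int × Int) item =>
                let c := pc.2 + (if item == k then 1 else 0)
                (pc.1 ++ [c], c))
              ([0], 0)
          d.insert k pc.1)
        PySem.Dict.empty)
        = (req.keys.foldl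
            (fun d k => d.insert (id k)
              ((discount.foldl
                (fun (pc : List Int × Int) item =>
                  let c := pc.2 + (if item == k then 1 else 0)
                  (pc.1 ++ [c], c)) ([0], 0)).1))
            PySem.Dict.empty) := rfl
    rw [hzeta]
    rw [PySem.Dict.items_foldl_insert_fresh (k := id)
      (v := fun k => (discount.foldl
        (fun (pc : List Int × Int) item =>
          let c := pc.2 + (if item == k then 1 else 0)
          (pc.1 ++ [c], c)) ([0], 0)).1)]
    · simp only [show (PySem.Dict.empty : PySem.Dict String (List Int)).items = [] from rfl, List.nil_append, id]
      apply List.map_congr_left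
      intro k _
      rw [pv_pref_fold]
      simp
    · intro a _; simp
    · simpa using hnd
  simp only [hitems]
  rw [PySem.List.pyRange_one, List.foldl_map]
  unfold pvSpec
  have h9 : ((discount.length : Int) - 9 - 0) = ((discount.length : Int) - 9) := by ring
  rw [h9]
  apply PySem.List.foldl_congr_mem
  intro acc j hj
  have hjlen : j + 10 ≤ discount.length := by
    have := List.mem_range.1 hj
    omega
  have hall : ((req.keys.map (fun k =>
      (k, (0:Int) :: (List.range discount.length).map
            (fun m => ((discount.take (m+1)).count k : Int))))).all (fun kp =>
        decide (PySem.List.pyGetD kp.2 ((0:Int) + ↑j + 10) 0 - PySem.List.pyGetD kp.2 ((0:Int) + ↑j) 0 ≥ req.getD kp.1 0)))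
      = pvOK req discount j := by
    rw [List.all_map]
    unfold pvOK
    apply pv_all_congr
    intro k _
    simp only [Function.comp, zero_add]
    have h10 : ((j : Int) + 10) = ((j + 10 : Nat) : Int) := by push_cast; ring
    rw [h10, pv_P_getD discount k (j+10) hjlen, pv_P_getD discount k j (by omega)]
    have hsplit : (discount.take (j+10)).count k
        = (discount.take j).count k + ((discount.drop j).take 10).count k := by
      rw [List.take_add, List.count_append]
    have : ((discount.take (j+10)).count k : Int) - ((discount.take j).count k : Int)
        = (((discount.drop j).take 10).count k : Int) := by
      rw [hsplit]; push_cast; ring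
    rw [this]
    simp [pvWin, ge_iff_le]
  simp only [zero_add] at hall ⊢
  rw [hall]

theorem solution_spec : Claim_equal_solution := by
  intro want number discount _ hpre
  have hnd : ((want.zip number).foldl (fun d p => d.insert p.1 p.2)
      PySem.Dict.empty).keys.Nodup := by
    apply PySem.Dict.nodup_keys_foldl_insert_key (want.zip number) Prod.fst
      (fun d x => x.2) PySem.Dict.empty
    simp [PySem.Dict.empty, PySem.Dict.keys]
  have hA : solution want number discount
      = pvSpec ((want.zip number).foldl (fun d p => d.insert p.1 p.2) PySem.Dict.empty) discount := by
    unfold solution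
    rw [pv_dict_eq want number hpre]
    exact pv_A_eq _ discount
  have hB : solution_alt want number discount
      = pvSpec ((want.zip number).foldl (fun d p => d.insert p.1 p.2) PySem.Dict.empty) discount := by
    unfold solution_alt
    exact pv_B_eq _ discount hnd
  unfold Spec_solution
  rw [hA, hB]
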